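-- pv_equiv track=rewrite | github.com/D3stroy3rX9/worldcup2026-predictor | src/preprocessing/feature_engineering.py | get_confederation
-- ===== SOURCE A (Python) =====
-- def get_confederation(team: str) -> str:
--     """Get confederation for a team."""
--     # Simplified confederation mapping
--     confederations = {
--         'UEFA': ['Germany', 'France', 'Spain', 'Italy', 'England', 'Portugal',
--                  'Netherlands', 'Belgium', 'Croatia', 'Switzerland', 'Austria',
--                  'Poland', 'Ukraine', 'Sweden', 'Norway', 'Denmark', 'Scotland',
--                  'Czech Republic', 'Serbia', 'Romania', 'Greece', 'Hungary',
--                  'Turkey', 'Wales', 'Ireland', 'Northern Ireland', 'Slovakia',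
--                  'Slovenia', 'Finland', 'Iceland', 'Albania', 'Bosnia and Herzegovina',
--                  'North Macedonia', 'Kosovo', 'Montenegro', 'Georgia', 'Luxembourg',
--                  'Cyprus', 'Malta', 'Andorra', 'San Marino', 'Liechtenstein',
--                  'Faroe Islands', 'Gibraltar', 'Moldova', 'Belarus', 'Latvia',
--                  'Lithuania', 'Estonia', 'Armenia', 'Azerbaijan', 'Kazakhstan'],
--         'CONMEBOL': ['Brazil', 'Argentina', 'Uruguay', 'Colombia', 'Chile',
--                      'Peru', 'Ecuador', 'Paraguay', 'Venezuela', 'Bolivia'],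
--         'CONCACAF': ['Mexico', 'USA', 'Canada', 'Costa Rica', 'Panama',
--                      'Jamaica', 'Honduras', 'El Salvador', 'Guatemala',
--                      'Haiti', 'Trinidad and Tobago', 'Curaçao', 'Suriname',
--                      'Cuba', 'Nicaragua', 'Bermuda', 'Dominican Republic'],
--         'CAF': ['Morocco', 'Senegal', 'Nigeria', 'Egypt', 'Cameroon',
--                 'Algeria', 'Tunisia', 'Ghana', "Côte d'Ivoire", 'Mali',
--                 'South Africa', 'DR Congo', 'Burkina Faso', 'Guinea',
--                 'Zambia', 'Zimbabwe', 'Kenya', 'Uganda', 'Tanzania',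
--                 'Cabo Verde', 'Mauritania', 'Gabon', 'Benin', 'Togo',
--                 'Madagascar', 'Central African Republic', 'Equatorial Guinea',
--                 'Libya', 'Sudan', 'Ethiopia', 'Namibia', 'Mozambique',
--                 'Botswana', 'Angola', 'Rwanda', 'Malawi', 'Sierra Leone',
--                 'Liberia', 'Niger', 'Chad', 'Comoros', 'Gambia'],
--         'AFC': ['Japan', 'South Korea', 'Australia', 'Iran', 'Saudi Arabia',
--                 'Qatar', 'UAE', 'Iraq', 'Oman', 'Bahrain', 'Jordan',
--                 'Syria', 'Palestine', 'Lebanon', 'Kuwait', 'China PR',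
--                 'Thailand', 'Vietnam', 'Indonesia', 'Malaysia', 'Philippines',
--                 'India', 'Uzbekistan', 'Tajikistan', 'Turkmenistan', 'Kyrgyzstan',
--                 'North Korea', 'Hong Kong', 'Singapore', 'Myanmar', 'Cambodia',
--                 'Laos', 'Nepal', 'Bangladesh', 'Maldives', 'Sri Lanka',
--                 'Afghanistan', 'Yemen'],
--         'OFC': ['New Zealand', 'Papua New Guinea', 'Fiji', 'Solomon Islands',
--                 'Vanuatu', 'New Caledonia', 'Tahiti', 'Samoa', 'Tonga',
--                 'American Samoa', 'Cook Islands'],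
--     }
--
--     for conf, teams in confederations.items():
--         if team in teams:
--             return conf
--     return 'Unknown'
-- ===== SOURCE B (Python) =====
-- # Flat team -> confederation table written out once; a single dict lookup per call.
-- TEAM_TO_CONF = {
--     'Germany': 'UEFA',
--     'France': 'UEFA',
--     'Spain': 'UEFA',
--     'Italy': 'UEFA',
--     'England': 'UEFA',
--     'Portugal': 'UEFA',
--     'Netherlands': 'UEFA',
--     'Belgium': 'UEFA',
--     'Croatia': 'UEFA',
--     'Switzerland': 'UEFA',
--     'Austria': 'UEFA',
--     'Poland': 'UEFA',
--     'Ukraine': 'UEFA',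
--     'Sweden': 'UEFA',
--     'Norway': 'UEFA',
--     'Denmark': 'UEFA',
--     'Scotland': 'UEFA',
--     'Czech Republic': 'UEFA',
--     'Serbia': 'UEFA',
--     'Romania': 'UEFA',
--     'Greece': 'UEFA',
--     'Hungary': 'UEFA',
--     'Turkey': 'UEFA',
--     'Wales': 'UEFA',
--     'Ireland': 'UEFA',
--     'Northern Ireland': 'UEFA',
--     'Slovakia': 'UEFA',
--     'Slovenia': 'UEFA',
--     'Finland': 'UEFA',
--     'Iceland': 'UEFA',
--     'Albania': 'UEFA',
--     'Bosnia and Herzegovina': 'UEFA',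
--     'North Macedonia': 'UEFA',
--     'Kosovo': 'UEFA',
--     'Montenegro': 'UEFA',
--     'Georgia': 'UEFA',
--     'Luxembourg': 'UEFA',
--     'Cyprus': 'UEFA',
--     'Malta': 'UEFA',
--     'Andorra': 'UEFA',
--     'San Marino': 'UEFA',
--     'Liechtenstein': 'UEFA',
--     'Faroe Islands': 'UEFA',
--     'Gibraltar': 'UEFA',
--     'Moldova': 'UEFA',
--     'Belarus': 'UEFA',
--     'Latvia': 'UEFA',
--     'Lithuania': 'UEFA',
--     'Estonia': 'UEFA',
--     'Armenia': 'UEFA',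
--     'Azerbaijan': 'UEFA',
--     'Kazakhstan': 'UEFA',
--     'Brazil': 'CONMEBOL',
--     'Argentina': 'CONMEBOL',
--     'Uruguay': 'CONMEBOL',
--     'Colombia': 'CONMEBOL',
--     'Chile': 'CONMEBOL',
--     'Peru': 'CONMEBOL',
--     'Ecuador': 'CONMEBOL',
--     'Paraguay': 'CONMEBOL',
--     'Venezuela': 'CONMEBOL',
--     'Bolivia': 'CONMEBOL',
--     'Mexico': 'CONCACAF',
--     'USA': 'CONCACAF',
--     'Canada': 'CONCACAF',
--     'Costa Rica': 'CONCACAF',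
--     'Panama': 'CONCACAF',
--     'Jamaica': 'CONCACAF',
--     'Honduras': 'CONCACAF',
--     'El Salvador': 'CONCACAF',
--     'Guatemala': 'CONCACAF',
--     'Haiti': 'CONCACAF',
--     'Trinidad and Tobago': 'CONCACAF',
--     'Curaçao': 'CONCACAF',
--     'Suriname': 'CONCACAF',
--     'Cuba': 'CONCACAF',
--     'Nicaragua': 'CONCACAF',
--     'Bermuda': 'CONCACAF',
--     'Dominican Republic': 'CONCACAF',
--     'Morocco': 'CAF',
--     'Senegal': 'CAF',
--     'Nigeria': 'CAF',
--     'Egypt': 'CAF',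
--     'Cameroon': 'CAF',
--     'Algeria': 'CAF',
--     'Tunisia': 'CAF',
--     'Ghana': 'CAF',
--     "Côte d'Ivoire": 'CAF',
--     'Mali': 'CAF',
--     'South Africa': 'CAF',
--     'DR Congo': 'CAF',
--     'Burkina Faso': 'CAF',
--     'Guinea': 'CAF',
--     'Zambia': 'CAF',
--     'Zimbabwe': 'CAF',
--     'Kenya': 'CAF',
--     'Uganda': 'CAF',
--     'Tanzania': 'CAF',
--     'Cabo Verde': 'CAF',
--     'Mauritania': 'CAF',
--     'Gabon': 'CAF',
--     'Benin': 'CAF',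
--     'Togo': 'CAF',
--     'Madagascar': 'CAF',
--     'Central African Republic': 'CAF',
--     'Equatorial Guinea': 'CAF',
--     'Libya': 'CAF',
--     'Sudan': 'CAF',
--     'Ethiopia': 'CAF',
--     'Namibia': 'CAF',
--     'Mozambique': 'CAF',
--     'Botswana': 'CAF',
--     'Angola': 'CAF',
--     'Rwanda': 'CAF',
--     'Malawi': 'CAF',
--     'Sierra Leone': 'CAF',
--     'Liberia': 'CAF',
--     'Niger': 'CAF',
--     'Chad': 'CAF',
--     'Comoros': 'CAF',
--     'Gambia': 'CAF',
--     'Japan': 'AFC',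
--     'South Korea': 'AFC',
--     'Australia': 'AFC',
--     'Iran': 'AFC',
--     'Saudi Arabia': 'AFC',
--     'Qatar': 'AFC',
--     'UAE': 'AFC',
--     'Iraq': 'AFC',
--     'Oman': 'AFC',
--     'Bahrain': 'AFC',
--     'Jordan': 'AFC',
--     'Syria': 'AFC',
--     'Palestine': 'AFC',
--     'Lebanon': 'AFC',
--     'Kuwait': 'AFC',
--     'China PR': 'AFC',
--     'Thailand': 'AFC',
--     'Vietnam': 'AFC',
--     'Indonesia': 'AFC',
--     'Malaysia': 'AFC',
--     'Philippines': 'AFC',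
--     'India': 'AFC',
--     'Uzbekistan': 'AFC',
--     'Tajikistan': 'AFC',
--     'Turkmenistan': 'AFC',
--     'Kyrgyzstan': 'AFC',
--     'North Korea': 'AFC',
--     'Hong Kong': 'AFC',
--     'Singapore': 'AFC',
--     'Myanmar': 'AFC',
--     'Cambodia': 'AFC',
--     'Laos': 'AFC',
--     'Nepal': 'AFC',
--     'Bangladesh': 'AFC',
--     'Maldives': 'AFC',
--     'Sri Lanka': 'AFC',
--     'Afghanistan': 'AFC',
--     'Yemen': 'AFC',
--     'New Zealand': 'OFC',
--     'Papua New Guinea': 'OFC',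
--     'Fiji': 'OFC',
--     'Solomon Islands': 'OFC',
--     'Vanuatu': 'OFC',
--     'New Caledonia': 'OFC',
--     'Tahiti': 'OFC',
--     'Samoa': 'OFC',
--     'Tonga': 'OFC',
--     'American Samoa': 'OFC',
--     'Cook Islands': 'OFC',
-- }
--
--
-- def get_confederation(team: str) -> str:
--     """Get confederation for a team."""
--     return TEAM_TO_CONF.get(team, 'Unknown')
-- ===== Notes on version B (the rewrite author's own statement) =====
-- stated objective: simpler
-- what changed: Replaces the per-call loop scanning each confederation's team list with a flat team->confederation dict literal (written out once at module level) and a single dict lookup with the same 'Unknown' default.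
import Mathlib
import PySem

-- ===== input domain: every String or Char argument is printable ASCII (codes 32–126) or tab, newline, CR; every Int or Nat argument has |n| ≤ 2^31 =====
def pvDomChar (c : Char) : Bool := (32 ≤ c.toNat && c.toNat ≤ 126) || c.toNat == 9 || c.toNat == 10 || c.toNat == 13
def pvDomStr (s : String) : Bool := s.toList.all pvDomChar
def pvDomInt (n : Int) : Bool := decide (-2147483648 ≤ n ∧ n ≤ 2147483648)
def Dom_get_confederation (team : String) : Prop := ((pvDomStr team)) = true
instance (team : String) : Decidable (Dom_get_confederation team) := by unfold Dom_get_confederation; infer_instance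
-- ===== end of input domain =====

-- B replaces A's per-call loop over per-confederation team lists with a flat, hand-written
-- team→confederation dict literal and a single lookup with the same default (objective: simpler).

-- ===== PORT A =====
-- A's nested table: confederation → list of teams
def pvConfs : List (String × List String) := [
  ("UEFA", ["Germany", "France", "Spain", "Italy", "England", "Portugal", "Netherlands", "Belgium", "Croatia", "Switzerland", "Austria", "Poland", "Ukraine", "Sweden", "Norway", "Denmark", "Scotland", "Czech Republic", "Serbia", "Romania", "Greece", "Hungary", "Turkey", "Wales", "Ireland", "Northern Ireland", "Slovakia", "Slovenia", "Finland", "Iceland", "Albania", "Bosnia and Herzegovina", "North Macedonia", "Kosovo", "Montenegro", "Georgia", "Luxembourg", "Cyprus", "Malta", "Andorra", "San Marino", "Liechtenstein", "Faroe Islands", "Gibraltar", "Moldova", "Belarus", "Latvia", "Lithuania", "Estonia", "Armenia", "Azerbaijan", "Kazakhstan"]),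
  ("CONMEBOL", ["Brazil", "Argentina", "Uruguay", "Colombia", "Chile", "Peru", "Ecuador", "Paraguay", "Venezuela", "Bolivia"]),
  ("CONCACAF", ["Mexico", "USA", "Canada", "Costa Rica", "Panama", "Jamaica", "Honduras", "El Salvador", "Guatemala", "Haiti", "Trinidad and Tobago", "Curaçao", "Suriname", "Cuba", "Nicaragua", "Bermuda", "Dominican Republic"]),
  ("CAF", ["Morocco", "Senegal", "Nigeria", "Egypt", "Cameroon", "Algeria", "Tunisia", "Ghana", "Côte d'Ivoire", "Mali", "South Africa", "DR Congo", "Burkina Faso", "Guinea", "Zambia", "Zimbabwe", "Kenya", "Uganda", "Tanzania", "Cabo Verde", "Mauritania", "Gabon", "Benin", "Togo", "Madagascar", "Central African Republic", "Equatorial Guinea", "Libya", "Sudan", "Ethiopia", "Namibia", "Mozambique", "Botswana", "Angola", "Rwanda", "Malawi", "Sierra Leone", "Liberia", "Niger", "Chad", "Comoros", "Gambia"]),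
  ("AFC", ["Japan", "South Korea", "Australia", "Iran", "Saudi Arabia", "Qatar", "UAE", "Iraq", "Oman", "Bahrain", "Jordan", "Syria", "Palestine", "Lebanon", "Kuwait", "China PR", "Thailand", "Vietnam", "Indonesia", "Malaysia", "Philippines", "India", "Uzbekistan", "Tajikistan", "Turkmenistan", "Kyrgyzstan", "North Korea", "Hong Kong", "Singapore", "Myanmar", "Cambodia", "Laos", "Nepal", "Bangladesh", "Maldives", "Sri Lanka", "Afghanistan", "Yemen"]),
  ("OFC", ["New Zealand", "Papua New Guinea", "Fiji", "Solomon Islands", "Vanuatu", "New Caledonia", "Tahiti", "Samoa", "Tonga", "American Samoa", "Cook Islands"])]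

-- the for-loop over confederations.items(): return the first conf whose list contains team
def pvAFind (team : String) : List (String × List String) → String
  | [] => "Unknown"
  | p :: rest => if p.2.contains team then p.1 else pvAFind team rest

def get_confederation (team : String) : String := pvAFind team pvConfs

-- ===== PORT B =====
-- Source B's flat literal dict TEAM_TO_CONF
def pvTeamToConf : PySem.Dict String String := PySem.Dict.ofList [
  ("Germany", "UEFA"),
  ("France", "UEFA"),
  ("Spain", "UEFA"),
  ("Italy", "UEFA"),
  ("England", "UEFA"),
  ("Portugal", "UEFA"),
  ("Netherlands", "UEFA"),
  ("Belgium", "UEFA"),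
  ("Croatia", "UEFA"),
  ("Switzerland", "UEFA"),
  ("Austria", "UEFA"),
  ("Poland", "UEFA"),
  ("Ukraine", "UEFA"),
  ("Sweden", "UEFA"),
  ("Norway", "UEFA"),
  ("Denmark", "UEFA"),
  ("Scotland", "UEFA"),
  ("Czech Republic", "UEFA"),
  ("Serbia", "UEFA"),
  ("Romania", "UEFA"),
  ("Greece", "UEFA"),
  ("Hungary", "UEFA"),
  ("Turkey", "UEFA"),
  ("Wales", "UEFA"),
  ("Ireland", "UEFA"),
  ("Northern Ireland", "UEFA"),
  ("Slovakia", "UEFA"),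
  ("Slovenia", "UEFA"),
  ("Finland", "UEFA"),
  ("Iceland", "UEFA"),
  ("Albania", "UEFA"),
  ("Bosnia and Herzegovina", "UEFA"),
  ("North Macedonia", "UEFA"),
  ("Kosovo", "UEFA"),
  ("Montenegro", "UEFA"),
  ("Georgia", "UEFA"),
  ("Luxembourg", "UEFA"),
  ("Cyprus", "UEFA"),
  ("Malta", "UEFA"),
  ("Andorra", "UEFA"),
  ("San Marino", "UEFA"),
  ("Liechtenstein", "UEFA"),
  ("Faroe Islands", "UEFA"),
  ("Gibraltar", "UEFA"),
  ("Moldova", "UEFA"),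
  ("Belarus", "UEFA"),
  ("Latvia", "UEFA"),
  ("Lithuania", "UEFA"),
  ("Estonia", "UEFA"),
  ("Armenia", "UEFA"),
  ("Azerbaijan", "UEFA"),
  ("Kazakhstan", "UEFA"),
  ("Brazil", "CONMEBOL"),
  ("Argentina", "CONMEBOL"),
  ("Uruguay", "CONMEBOL"),
  ("Colombia", "CONMEBOL"),
  ("Chile", "CONMEBOL"),
  ("Peru", "CONMEBOL"),
  ("Ecuador", "CONMEBOL"),
  ("Paraguay", "CONMEBOL"),
  ("Venezuela", "CONMEBOL"),
  ("Bolivia", "CONMEBOL"),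
  ("Mexico", "CONCACAF"),
  ("USA", "CONCACAF"),
  ("Canada", "CONCACAF"),
  ("Costa Rica", "CONCACAF"),
  ("Panama", "CONCACAF"),
  ("Jamaica", "CONCACAF"),
  ("Honduras", "CONCACAF"),
  ("El Salvador", "CONCACAF"),
  ("Guatemala", "CONCACAF"),
  ("Haiti", "CONCACAF"),
  ("Trinidad and Tobago", "CONCACAF"),
  ("Curaçao", "CONCACAF"),
  ("Suriname", "CONCACAF"),
  ("Cuba", "CONCACAF"),
  ("Nicaragua", "CONCACAF"),
  ("Bermuda", "CONCACAF"),
  ("Dominican Republic", "CONCACAF"),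
  ("Morocco", "CAF"),
  ("Senegal", "CAF"),
  ("Nigeria", "CAF"),
  ("Egypt", "CAF"),
  ("Cameroon", "CAF"),
  ("Algeria", "CAF"),
  ("Tunisia", "CAF"),
  ("Ghana", "CAF"),
  ("Côte d'Ivoire", "CAF"),
  ("Mali", "CAF"),
  ("South Africa", "CAF"),
  ("DR Congo", "CAF"),
  ("Burkina Faso", "CAF"),
  ("Guinea", "CAF"),
  ("Zambia", "CAF"),
  ("Zimbabwe", "CAF"),
  ("Kenya", "CAF"),
  ("Uganda", "CAF"),
  ("Tanzania", "CAF"),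
  ("Cabo Verde", "CAF"),
  ("Mauritania", "CAF"),
  ("Gabon", "CAF"),
  ("Benin", "CAF"),
  ("Togo", "CAF"),
  ("Madagascar", "CAF"),
  ("Central African Republic", "CAF"),
  ("Equatorial Guinea", "CAF"),
  ("Libya", "CAF"),
  ("Sudan", "CAF"),
  ("Ethiopia", "CAF"),
  ("Namibia", "CAF"),
  ("Mozambique", "CAF"),
  ("Botswana", "CAF"),
  ("Angola", "CAF"),
  ("Rwanda", "CAF"),
  ("Malawi", "CAF"),
  ("Sierra Leone", "CAF"),
  ("Liberia", "CAF"),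
  ("Niger", "CAF"),
  ("Chad", "CAF"),
  ("Comoros", "CAF"),
  ("Gambia", "CAF"),
  ("Japan", "AFC"),
  ("South Korea", "AFC"),
  ("Australia", "AFC"),
  ("Iran", "AFC"),
  ("Saudi Arabia", "AFC"),
  ("Qatar", "AFC"),
  ("UAE", "AFC"),
  ("Iraq", "AFC"),
  ("Oman", "AFC"),
  ("Bahrain", "AFC"),
  ("Jordan", "AFC"),
  ("Syria", "AFC"),
  ("Palestine", "AFC"),
  ("Lebanon", "AFC"),
  ("Kuwait", "AFC"),
  ("China PR", "AFC"),
  ("Thailand", "AFC"),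
  ("Vietnam", "AFC"),
  ("Indonesia", "AFC"),
  ("Malaysia", "AFC"),
  ("Philippines", "AFC"),
  ("India", "AFC"),
  ("Uzbekistan", "AFC"),
  ("Tajikistan", "AFC"),
  ("Turkmenistan", "AFC"),
  ("Kyrgyzstan", "AFC"),
  ("North Korea", "AFC"),
  ("Hong Kong", "AFC"),
  ("Singapore", "AFC"),
  ("Myanmar", "AFC"),
  ("Cambodia", "AFC"),
  ("Laos", "AFC"),
  ("Nepal", "AFC"),
  ("Bangladesh", "AFC"),
  ("Maldives", "AFC"),
  ("Sri Lanka", "AFC"),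
  ("Afghanistan", "AFC"),
  ("Yemen", "AFC"),
  ("New Zealand", "OFC"),
  ("Papua New Guinea", "OFC"),
  ("Fiji", "OFC"),
  ("Solomon Islands", "OFC"),
  ("Vanuatu", "OFC"),
  ("New Caledonia", "OFC"),
  ("Tahiti", "OFC"),
  ("Samoa", "OFC"),
  ("Tonga", "OFC"),
  ("American Samoa", "OFC"),
  ("Cook Islands", "OFC")]

-- return TEAM_TO_CONF.get(team, 'Unknown')
def get_confederation_alt (team : String) : String := pvTeamToConf.getD team "Unknown"

-- ===== PRECONDITION & SPEC =====
def Spec_get_confederation (team : String) (out : String) : Prop := out = get_confederation_alt team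
instance (team : String) (out : String) : Decidable (Spec_get_confederation team out) := by unfold Spec_get_confederation; infer_instance

-- ===== CLAIM =====
def Claim_equal_get_confederation : Prop := ∀ (team : String), Dom_get_confederation team → Spec_get_confederation team (get_confederation team)

-- ===== LEMMAS AND PROOFS =====

-- first-match search over a flat (team, conf) pair list, with A's default
def pvFlatFind (team : String) : List (String × String) → String
  | [] => "Unknown"
  | p :: rest => if p.1 == team then p.2 else pvFlatFind team rest

-- A's nested loop equals the flat first-match search over the flattened table
theorem pvAFind_eq_flat (team : String) (l : List (String × List String)) :
    pvAFind team l = pvFlatFind team (l.flatMap fun p => p.2.map fun t => (t, p.1)) := by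
  induction l with
  | nil => rfl
  | cons p rest ih =>
    simp only [pvAFind, List.flatMap_cons]
    rw [ih]
    obtain ⟨c, ts⟩ := p
    induction ts with
    | nil => simp
    | cons t ts iht =>
      simp only [List.map_cons, List.cons_append, pvFlatFind]
      by_cases h : team = t
      · subst h; simp
      · have hb : (t == team) = false := by simp [Ne.symm h]
        simp only [List.contains_cons, show (team == t) = false by simp [h],
          Bool.false_or, hb]
        simpa using iht

-- a literal dict's .get with default is the flat first-match search
theorem pvMk_getD_eq_flatFind (team : String) (l : List (String × String)) :
    (PySem.Dict.mk l).getD team "Unknown" = pvFlatFind team l := by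
  induction l with
  | nil => simp [pvFlatFind, PySem.Dict.getD_eq_get?_getD, PySem.Dict.get?]
  | cons p rest ih =>
    obtain ⟨k, v⟩ := p
    rw [PySem.Dict.getD_eq_get?_getD, PySem.Dict.get?_mk_cons]
    rw [PySem.Dict.getD_eq_get?_getD] at ih
    simp only [pvFlatFind]
    split <;> simp_all

-- ===== VERDICT =====
set_option maxRecDepth 40000 in
theorem get_confederation_spec : Claim_equal_get_confederation := by
  intro team _
  unfold Spec_get_confederation get_confederation get_confederation_alt
  rw [pvAFind_eq_flat]
  have h1 : pvTeamToConf = PySem.Dict.mk (pvConfs.flatMap fun p => p.2.map fun t => (t, p.1)) := by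
    rfl
  rw [h1, pvMk_getD_eq_flatFind]
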